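-- pv_equiv track=rewrite | github.com/GitMonsters/octotetrahedral-agi | re_arc_bench_solves/12a23f24.py | transform
-- ===== SOURCE A (Python) =====
-- def transform(grid):
--     H = len(grid)
--     W = len(grid[0])
--     from collections import Counter
--     bg = Counter(c for row in grid for c in row).most_common(1)[0][0]
--
--     min_r, max_r, min_c, max_c = H, -1, W, -1
--     for r in range(H):
--         for c in range(W):
--             if grid[r][c] != bg:
--                 min_r = min(min_r, r)
--                 max_r = max(max_r, r)
--                 min_c = min(min_c, c)
--                 max_c = max(max_c, c)
--
--     cr = (min_r + max_r) // 2
--     cc = (min_c + max_c) // 2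
--     fill = grid[cr][cc]
--
--     output = [row[:] for row in grid]
--
--     corners_dirs = [
--         (min_r, min_c, -1, -1),
--         (min_r, max_c, -1, +1),
--         (max_r, min_c, +1, -1),
--         (max_r, max_c, +1, +1),
--     ]
--
--     for r0, c0, dr, dc in corners_dirs:
--         r, c = r0 + dr, c0 + dc
--         while 0 <= r < H and 0 <= c < W:
--             output[r][c] = fill
--             r += dr
--             c += dc
--
--     return output
-- ===== SOURCE B (Python) =====
-- def transform(grid):
--     H = len(grid)
--     W = len(grid[0])
--     from collections import Counter
--     bg = Counter(c for row in grid for c in row).most_common(1)[0][0]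
--
--     min_r, max_r, min_c, max_c = H, -1, W, -1
--     for r in range(H):
--         for c in range(W):
--             if grid[r][c] != bg:
--                 min_r = min(min_r, r)
--                 max_r = max(max_r, r)
--                 min_c = min(min_c, c)
--                 max_c = max(max_c, c)
--
--     fill = grid[(min_r + max_r) // 2][(min_c + max_c) // 2]
--
--     def on_ray(r, c):
--         return ((r < min_r and c < min_c and min_r - r == min_c - c)
--                 or (r < min_r and c > max_c and min_r - r == c - max_c)
--                 or (r > max_r and c < min_c and r - max_r == min_c - c)
--                 or (r > max_r and c > max_c and r - max_r == c - max_c))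
--
--     return [[fill if on_ray(r, c) else grid[r][c] for c in range(W)]
--             for r in range(H)]
-- ===== Notes on version B (the rewrite author's own statement) =====
-- stated objective: alternative
-- what changed: The four mutating corner-ray walks over a copied grid are replaced by a single predicate-driven rebuild: B computes the same background, bounding box and fill value, then emits every cell in one pass, writing fill exactly where the cell lies strictly beyond a bounding-box corner on the matching diagonal.
-- outside the precondition, e.g. on transform([[1, 2], [3, 4, 5]]): A returns [[1, 2], [3, 4, 5]], B returns [[1, 2], [3, 4]]; on transform([[], [1], [2]]): A returns [[], [1], [2]], B returns [[], [], []]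
import Mathlib
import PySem

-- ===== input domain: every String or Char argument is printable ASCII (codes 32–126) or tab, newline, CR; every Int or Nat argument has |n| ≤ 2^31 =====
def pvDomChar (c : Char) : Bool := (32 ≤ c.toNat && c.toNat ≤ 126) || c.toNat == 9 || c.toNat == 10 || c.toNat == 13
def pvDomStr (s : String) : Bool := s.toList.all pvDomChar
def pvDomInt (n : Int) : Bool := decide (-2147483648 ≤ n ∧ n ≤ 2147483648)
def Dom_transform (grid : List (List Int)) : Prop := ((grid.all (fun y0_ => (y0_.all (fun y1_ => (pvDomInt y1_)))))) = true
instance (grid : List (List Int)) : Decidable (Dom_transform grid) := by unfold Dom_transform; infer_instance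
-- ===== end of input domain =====

-- B replaces A's four mutating corner-ray walks by one predicate-driven full-grid rebuild (alternative decomposition, same cost);
-- background, bounding box and fill lookup are the identical computation in both, so both ports share the helpers pvBg/pvBBox.

-- ===== PORT A =====
-- bg = Counter(c for row in grid for c in row).most_common(1)[0][0]; total form (first key of maximal count), Pre_ keeps the grid nonempty
def pvBg (grid : List (List Int)) : Int :=
  match PySem.List.max? (PySem.Dict.counter (grid.flatMap (fun row => row))).items (fun kv => kv.2) with
  | some kv => kv.1
  | none => 0

-- the bounding-box double loop with state (min_r, max_r, min_c, max_c), started at (H, -1, W, -1)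
def pvBBox (grid : List (List Int)) (bg H W : Int) : Int × Int × Int × Int :=
  (PySem.List.pyRange 0 H 1).foldl (fun s r =>
    (PySem.List.pyRange 0 W 1).foldl (fun s c =>
      if PySem.List.pyGetD (PySem.List.pyGetD grid r []) c 0 ≠ bg then
        (min s.1 r, max s.2.1 r, min s.2.2.1 c, max s.2.2.2 c)
      else s) s) (H, -1, W, -1)

-- the 'while 0 <= r < H and 0 <= c < W' walk; the fuel H.toNat only makes the recursion total (r moves by ±1 inside [0,H))
def pvRay (H W fill dr dc : Int) : Nat → Int → Int → List (List Int) → List (List Int)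
  | 0, _, _, out => out
  | fuel+1, r, c, out =>
    if 0 ≤ r ∧ r < H ∧ 0 ≤ c ∧ c < W then
      pvRay H W fill dr dc fuel (r + dr) (c + dc)
        (PySem.List.pySetD out r (PySem.List.pySetD (PySem.List.pyGetD out r []) c fill))
    else out

def transform (grid : List (List Int)) : List (List Int) :=
  let H : Int := grid.length
  let W : Int := (PySem.List.pyGetD grid 0 []).length
  let bg := pvBg grid
  let b := pvBBox grid bg H W
  let fill := PySem.List.pyGetD
    (PySem.List.pyGetD grid (PySem.Int.floordiv (b.1 + b.2.1) 2) [])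
    (PySem.Int.floordiv (b.2.2.1 + b.2.2.2) 2) 0
  let output := grid.map (fun row => row)
  let corners : List (Int × Int × Int × Int) :=
    [(b.1, b.2.2.1, -1, -1), (b.1, b.2.2.2, -1, 1), (b.2.1, b.2.2.1, 1, -1), (b.2.1, b.2.2.2, 1, 1)]
  corners.foldl (fun out q =>
    pvRay H W fill q.2.2.1 q.2.2.2 H.toNat (q.1 + q.2.2.1) (q.2.1 + q.2.2.2) out) output

-- ===== PORT B =====
def transform_alt (grid : List (List Int)) : List (List Int) :=
  let H : Int := grid.length
  let W : Int := (PySem.List.pyGetD grid 0 []).length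
  let bg := pvBg grid
  let b := pvBBox grid bg H W
  let fill := PySem.List.pyGetD
    (PySem.List.pyGetD grid (PySem.Int.floordiv (b.1 + b.2.1) 2) [])
    (PySem.Int.floordiv (b.2.2.1 + b.2.2.2) 2) 0
  (PySem.List.pyRange 0 H 1).map (fun r =>
    (PySem.List.pyRange 0 W 1).map (fun c =>
      if (r < b.1 ∧ c < b.2.2.1 ∧ b.1 - r = b.2.2.1 - c)
        ∨ (r < b.1 ∧ b.2.2.2 < c ∧ b.1 - r = c - b.2.2.2)
        ∨ (b.2.1 < r ∧ c < b.2.2.1 ∧ r - b.2.1 = b.2.2.1 - c)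
        ∨ (b.2.1 < r ∧ b.2.2.2 < c ∧ r - b.2.1 = c - b.2.2.2)
      then fill
      else PySem.List.pyGetD (PySem.List.pyGetD grid r []) c 0))

-- ===== PRECONDITION & SPEC =====
-- Pre_ keeps the natural domain: a nonempty rectangular grid with nonempty rows. It excludes the empty grid and grids with a
-- row shorter than row 0 (A raises IndexError there), and the remaining ragged grids A happens to accept (extra cells beyond
-- len(grid[0]), or an empty row 0 read back via a negative index) — outside a grid's natural shape; see the claim's cites.
def Pre_transform (grid : List (List Int)) : Prop :=
  grid ≠ [] ∧ 0 < (grid.headD []).length ∧ ∀ row ∈ grid, row.length = (grid.headD []).length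
instance (grid : List (List Int)) : Decidable (Pre_transform grid) := by unfold Pre_transform; infer_instance
def pvWitness_transform : List (List Int) := [[1, 2], [1, 1]]
def Spec_transform (grid : List (List Int)) (out : List (List Int)) : Prop := out = transform_alt grid
instance (grid : List (List Int)) (out : List (List Int)) : Decidable (Spec_transform grid out) := by unfold Spec_transform; infer_instance

-- ===== CLAIM (what is proved, stated in full; the proofs are below) =====
def Claim_equal_transform : Prop := ∀ (grid : List (List Int)), Dom_transform grid → Pre_transform grid → Spec_transform grid (transform grid)

-- ===== LEMMAS AND PROOFS =====

-- which cells a walk pvRay writes (mirrors pvRay's recursion)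
def pvVis (H W dr dc : Int) : Nat → Int → Int → Int → Int → Bool
  | 0, _, _, _, _ => false
  | fuel+1, r, c, i, j =>
      decide (0 ≤ r ∧ r < H ∧ 0 ≤ c ∧ c < W) &&
        (decide (i = r ∧ j = c) || pvVis H W dr dc fuel (r + dr) (c + dc) i j)

-- cell read through Python indexing
def gget (out : List (List Int)) (i j : Int) : Int :=
  PySem.List.pyGetD (PySem.List.pyGetD out i []) j 0

lemma foldl_inv {α β : Type} (P : β → Prop) (f : β → α → β) (l : List α) (init : β)
    (h0 : P init) (hstep : ∀ s x, P s → P (f s x)) : P (l.foldl f init) := by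
  induction l generalizing init with
  | nil => exact h0
  | cons x t ih => exact ih _ (hstep _ _ h0)

-- the bounding-box fold stays inside its sentinel bounds
lemma pvBBox_bounds (grid : List (List Int)) (bg H W : Int) :
    (pvBBox grid bg H W).1 ≤ H ∧ -1 ≤ (pvBBox grid bg H W).2.1 ∧
    (pvBBox grid bg H W).2.2.1 ≤ W ∧ -1 ≤ (pvBBox grid bg H W).2.2.2 := by
  unfold pvBBox
  apply foldl_inv (P := fun s : Int × Int × Int × Int => s.1 ≤ H ∧ -1 ≤ s.2.1 ∧ s.2.2.1 ≤ W ∧ -1 ≤ s.2.2.2)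
  · exact ⟨le_refl _, by norm_num⟩
  · intro s r hs
    apply foldl_inv (P := fun s : Int × Int × Int × Int => s.1 ≤ H ∧ -1 ≤ s.2.1 ∧ s.2.2.1 ≤ W ∧ -1 ≤ s.2.2.2) _ _ _ hs
    intro t c ht
    dsimp only
    split
    · refine ⟨?_, ?_, ?_, ?_⟩ <;> simp only [min_le_iff, le_max_iff] <;> tauto
    · exact ht

-- closed form for pvVis: the cells k steps along the ray whose whole prefix stays in bounds
lemma pvVis_iff (H W dr dc : Int) (hdr : dr = 1 ∨ dr = -1) (hdc : dc = 1 ∨ dc = -1) :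
    ∀ (fuel : Nat) (r c i j : Int),
      pvVis H W dr dc fuel r c i j = true ↔
        ∃ k : Nat, k < fuel ∧ i = r + k * dr ∧ j = c + k * dc ∧
          ∀ k' : Nat, k' ≤ k →
            0 ≤ r + k' * dr ∧ r + k' * dr < H ∧ 0 ≤ c + k' * dc ∧ c + k' * dc < W := by
  rcases hdr with rfl | rfl <;> rcases hdc with rfl | rfl <;>
  ( intro fuel
    induction fuel with
    | zero => intro r c i j; simp [pvVis]
    | succ n ih =>
      intro r c i j
      simp only [pvVis, Bool.and_eq_true, Bool.or_eq_true, decide_eq_true_eq]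
      constructor
      · rintro ⟨hin, ⟨rfl, rfl⟩ | hrec⟩
        · refine ⟨0, by omega, by simp, by simp, ?_⟩
          intro k' hk'
          simp only [Nat.le_zero] at hk'; subst hk'
          simpa using hin
        · obtain ⟨k, hk, hi, hj, hpre⟩ := (ih (r + _) (c + _) i j).1 hrec
          refine ⟨k + 1, by omega, ?_, ?_, ?_⟩
          · simp only [mul_one, mul_neg_one] at hi ⊢; push_cast at hi ⊢; omega
          · simp only [mul_one, mul_neg_one] at hj ⊢; push_cast at hj ⊢; omega
          · intro k' hk'
            cases k' with
            | zero => simpa using hin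
            | succ m =>
              have h := hpre m (by omega)
              simp only [mul_one, mul_neg_one] at h ⊢; push_cast at h ⊢; omega
      · rintro ⟨k, hk, hi, hj, hpre⟩
        have hin := hpre 0 (Nat.zero_le _)
        simp only [Nat.cast_zero, zero_mul, add_zero] at hin
        refine ⟨hin, ?_⟩
        cases k with
        | zero =>
          left
          simp only [Nat.cast_zero, zero_mul, add_zero] at hi hj
          exact ⟨hi, hj⟩
        | succ m =>
          right
          refine (ih (r + _) (c + _) i j).2 ⟨m, by omega, ?_, ?_, ?_⟩
          · simp only [mul_one, mul_neg_one] at hi ⊢; push_cast at hi ⊢; omega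
          · simp only [mul_one, mul_neg_one] at hj ⊢; push_cast at hj ⊢; omega
          · intro k' hk'
            have h := hpre (k' + 1) (by omega)
            simp only [mul_one, mul_neg_one] at h ⊢; push_cast at h ⊢; omega )

-- writing one cell through Python list mutation, read back cell-wise
lemma gget_set (out : List (List Int)) (W r c fill i j : Int)
    (hrow : ∀ row ∈ out, (row.length : Int) = W)
    (hr0 : 0 ≤ r) (hrH : r < (out.length : Int)) (hc0 : 0 ≤ c) (hcW : c < W)
    (hi0 : 0 ≤ i) (hiH : i < (out.length : Int)) (hj0 : 0 ≤ j) (hjW : j < W) :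
    gget (PySem.List.pySetD out r (PySem.List.pySetD (PySem.List.pyGetD out r []) c fill)) i j
      = if i = r ∧ j = c then fill else gget out i j := by
  have hrow_r : (PySem.List.pyGetD out r []) = out[r.toNat]'(by omega) :=
    PySem.List.pyGetD_eq_getElem _ _ hr0 hrH
  have hlenr : ((out[r.toNat]'(by omega) : List Int).length : Int) = W :=
    hrow _ (List.getElem_mem _)
  rw [PySem.List.pySetD_of_nonneg _ _ hr0, PySem.List.pySetD_of_nonneg _ _ hc0, hrow_r]
  unfold gget
  have hlen_set : ((out.set r.toNat ((out[r.toNat]'(by omega)).set c.toNat fill)).length : Int) = (out.length : Int) := by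
    simp
  rw [PySem.List.pyGetD_eq_getElem _ _ hi0 (by omega), PySem.List.pyGetD_eq_getElem _ _ hi0 hiH]
  by_cases hi : i = r
  · subst hi
    rw [List.getElem_set_self (by omega)]
    rw [PySem.List.pyGetD_eq_getElem _ _ hj0 (by simp; omega), PySem.List.pyGetD_eq_getElem _ _ hj0 (by omega)]
    by_cases hj : j = c
    · subst hj
      rw [List.getElem_set_self (by simp only [List.length_set]; omega)]
      simp
    · rw [List.getElem_set_ne (fun h => hj (by omega)) (by simp only [List.length_set]; omega)]
      simp [hj]
  · rw [List.getElem_set_ne (fun h => hi (by omega)) (by simp only [List.length_set]; omega)]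
    simp [hi]

-- a whole walk: shape is preserved and each cell is fill exactly on the visited set
lemma pvRay_spec (H W fill dr dc : Int) :
    ∀ (fuel : Nat) (r c : Int) (out : List (List Int)),
      (out.length : Int) = H →
      (∀ row ∈ out, (row.length : Int) = W) →
      ((pvRay H W fill dr dc fuel r c out).length : Int) = H ∧
      (∀ row ∈ pvRay H W fill dr dc fuel r c out, (row.length : Int) = W) ∧
      (∀ i j : Int, 0 ≤ i → i < H → 0 ≤ j → j < W →
        gget (pvRay H W fill dr dc fuel r c out) i j
          = if pvVis H W dr dc fuel r c i j then fill else gget out i j) := by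
  intro fuel
  induction fuel with
  | zero =>
    intro r c out h1 h2
    refine ⟨h1, h2, ?_⟩
    intro i j _ _ _ _
    simp [pvRay, pvVis]
  | succ n ih =>
    intro r c out h1 h2
    by_cases hin : 0 ≤ r ∧ r < H ∧ 0 ≤ c ∧ c < W
    · have hrH : r < (out.length : Int) := by omega
      have hrow_r : (PySem.List.pyGetD out r []) = out[r.toNat]'(by omega) :=
        PySem.List.pyGetD_eq_getElem _ _ hin.1 hrH
      have hlenr : ((out[r.toNat]'(by omega) : List Int).length : Int) = W :=
        h2 _ (List.getElem_mem _)
      have hlen' : ((PySem.List.pySetD out r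
          (PySem.List.pySetD (PySem.List.pyGetD out r []) c fill)).length : Int) = H := by
        rw [PySem.List.length_pySetD]; exact h1
      have hrow' : ∀ row ∈ PySem.List.pySetD out r
          (PySem.List.pySetD (PySem.List.pyGetD out r []) c fill), ((row.length : Int)) = W := by
        intro row hmem
        rw [PySem.List.pySetD_of_nonneg _ _ hin.1] at hmem
        rcases List.mem_or_eq_of_mem_set hmem with h | h
        · exact h2 _ h
        · subst h
          rw [PySem.List.pySetD_of_nonneg _ _ hin.2.2.1, hrow_r]
          simp [hlenr]
      obtain ⟨L, R, G⟩ := ih (r + dr) (c + dc) _ hlen' hrow'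
      simp only [pvRay, if_pos hin]
      refine ⟨L, R, ?_⟩
      intro i j hi0 hiH hj0 hjW
      rw [G i j hi0 hiH hj0 hjW]
      rw [gget_set out W r c fill i j h2 hin.1 hrH hin.2.2.1 hin.2.2.2 hi0 (by omega) hj0 hjW]
      by_cases h4 : pvVis H W dr dc n (r + dr) (c + dc) i j <;> by_cases h5 : i = r ∧ j = c <;>
        simp [pvVis, h4, h5, hin]
    · simp only [pvRay, if_neg hin]
      refine ⟨h1, h2, ?_⟩
      intro i j _ _ _ _
      simp [pvVis, hin]

lemma vis_corner1 (H W minR minC i j : Int) (h1 : minR ≤ H) (h3 : minC ≤ W)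
    (hi0 : 0 ≤ i) (hiH : i < H) (hj0 : 0 ≤ j) (_hjW : j < W) :
    pvVis H W (-1) (-1) H.toNat (minR + -1) (minC + -1) i j = true ↔
      (i < minR ∧ j < minC ∧ minR - i = minC - j) := by
  rw [pvVis_iff H W (-1) (-1) (Or.inr rfl) (Or.inr rfl)]
  simp only [mul_neg_one]
  constructor
  · rintro ⟨k, hk, hi, hj, -⟩; omega
  · rintro ⟨hA, hB, hC⟩
    exact ⟨(minR - 1 - i).toNat, by omega, by omega, by omega, fun k' hk' => by omega⟩

lemma vis_corner2 (H W minR maxC i j : Int) (h1 : minR ≤ H) (h4 : -1 ≤ maxC)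
    (hi0 : 0 ≤ i) (hiH : i < H) (_hj0 : 0 ≤ j) (hjW : j < W) :
    pvVis H W (-1) 1 H.toNat (minR + -1) (maxC + 1) i j = true ↔
      (i < minR ∧ maxC < j ∧ minR - i = j - maxC) := by
  rw [pvVis_iff H W (-1) 1 (Or.inr rfl) (Or.inl rfl)]
  simp only [mul_neg_one, mul_one]
  constructor
  · rintro ⟨k, hk, hi, hj, -⟩; omega
  · rintro ⟨hA, hB, hC⟩
    exact ⟨(minR - 1 - i).toNat, by omega, by omega, by omega, fun k' hk' => by omega⟩

lemma vis_corner3 (H W maxR minC i j : Int) (h2 : -1 ≤ maxR) (h3 : minC ≤ W)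
    (hi0 : 0 ≤ i) (hiH : i < H) (hj0 : 0 ≤ j) (_hjW : j < W) :
    pvVis H W 1 (-1) H.toNat (maxR + 1) (minC + -1) i j = true ↔
      (maxR < i ∧ j < minC ∧ i - maxR = minC - j) := by
  rw [pvVis_iff H W 1 (-1) (Or.inl rfl) (Or.inr rfl)]
  simp only [mul_neg_one, mul_one]
  constructor
  · rintro ⟨k, hk, hi, hj, -⟩; omega
  · rintro ⟨hA, hB, hC⟩
    exact ⟨(i - maxR - 1).toNat, by omega, by omega, by omega, fun k' hk' => by omega⟩

lemma vis_corner4 (H W maxR maxC i j : Int) (h2 : -1 ≤ maxR) (h4 : -1 ≤ maxC)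
    (_hi0 : 0 ≤ i) (hiH : i < H) (_hj0 : 0 ≤ j) (hjW : j < W) :
    pvVis H W 1 1 H.toNat (maxR + 1) (maxC + 1) i j = true ↔
      (maxR < i ∧ maxC < j ∧ i - maxR = j - maxC) := by
  rw [pvVis_iff H W 1 1 (Or.inl rfl) (Or.inl rfl)]
  simp only [mul_one]
  constructor
  · rintro ⟨k, hk, hi, hj, -⟩; omega
  · rintro ⟨hA, hB, hC⟩
    exact ⟨(i - maxR - 1).toNat, by omega, by omega, by omega, fun k' hk' => by omega⟩

-- the four walks of A produce exactly B's one-pass predicate rebuild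
lemma main_eq (grid : List (List Int)) (H W fill minR maxR minC maxC : Int)
    (hH : (grid.length : Int) = H)
    (hW : ∀ row ∈ grid, (row.length : Int) = W)
    (h1 : minR ≤ H) (h2 : -1 ≤ maxR) (h3 : minC ≤ W) (h4 : -1 ≤ maxC) :
    (([(minR, minC, -1, -1), (minR, maxC, -1, 1), (maxR, minC, 1, -1), (maxR, maxC, 1, 1)] :
        List (Int × Int × Int × Int)).foldl
      (fun out q =>
        pvRay H W fill q.2.2.1 q.2.2.2 H.toNat (q.1 + q.2.2.1) (q.2.1 + q.2.2.2) out)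
      (grid.map (fun row => row)))
    = (PySem.List.pyRange 0 H 1).map (fun r =>
        (PySem.List.pyRange 0 W 1).map (fun c =>
          if (r < minR ∧ c < minC ∧ minR - r = minC - c)
            ∨ (r < minR ∧ maxC < c ∧ minR - r = c - maxC)
            ∨ (maxR < r ∧ c < minC ∧ r - maxR = minC - c)
            ∨ (maxR < r ∧ maxC < c ∧ r - maxR = c - maxC)
          then fill
          else PySem.List.pyGetD (PySem.List.pyGetD grid r []) c 0)) := by
  simp only [List.foldl_cons, List.foldl_nil, List.map_id']
  obtain ⟨L1, R1, G1⟩ := pvRay_spec H W fill (-1) (-1) H.toNat (minR + -1) (minC + -1) grid hH hW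
  obtain ⟨L2, R2, G2⟩ := pvRay_spec H W fill (-1) 1 H.toNat (minR + -1) (maxC + 1) _ L1 R1
  obtain ⟨L3, R3, G3⟩ := pvRay_spec H W fill 1 (-1) H.toNat (maxR + 1) (minC + -1) _ L2 R2
  obtain ⟨L4, R4, G4⟩ := pvRay_spec H W fill 1 1 H.toNat (maxR + 1) (maxC + 1) _ L3 R3
  apply List.ext_getElem
  · rw [List.length_map, PySem.List.length_pyRange_one]; omega
  · intro n h5 h6
    have hn : (n : Int) < H := by omega
    have hn0 : (0:Int) ≤ n := by positivity
    rw [List.getElem_map, PySem.List.getElem_pyRange_one]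
    apply List.ext_getElem
    · have := R4 _ (List.getElem_mem h5)
      rw [List.length_map, PySem.List.length_pyRange_one]; omega
    · intro m h7 h8
      have hm : (m : Int) < W := by
        have := R4 _ (List.getElem_mem h5); omega
      have hm0 : (0:Int) ≤ m := by positivity
      rw [List.getElem_map, PySem.List.getElem_pyRange_one]
      have hcell := G4 (n : Int) (m : Int) hn0 hn hm0 hm
      rw [G3 n m hn0 hn hm0 hm, G2 n m hn0 hn hm0 hm, G1 n m hn0 hn hm0 hm] at hcell
      have egg : gget (pvRay H W fill 1 1 H.toNat (maxR + 1) (maxC + 1)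
          (pvRay H W fill 1 (-1) H.toNat (maxR + 1) (minC + -1)
            (pvRay H W fill (-1) 1 H.toNat (minR + -1) (maxC + 1)
              (pvRay H W fill (-1) (-1) H.toNat (minR + -1) (minC + -1) grid)))) n m
          = ((pvRay H W fill 1 1 H.toNat (maxR + 1) (maxC + 1)
          (pvRay H W fill 1 (-1) H.toNat (maxR + 1) (minC + -1)
            (pvRay H W fill (-1) 1 H.toNat (minR + -1) (maxC + 1)
              (pvRay H W fill (-1) (-1) H.toNat (minR + -1) (minC + -1) grid))))[n]'h5)[m]'h7 := by
        unfold gget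
        rw [PySem.List.pyGetD_eq_getElem _ _ hn0 (by omega),
            PySem.List.pyGetD_eq_getElem _ _ hm0 (by simpa using h7)]
        simp
      rw [← egg, hcell]
      simp only [zero_add,
          vis_corner1 H W minR minC (↑n) (↑m) h1 h3 hn0 hn hm0 hm,
          vis_corner2 H W minR maxC (↑n) (↑m) h1 h4 hn0 hn hm0 hm,
          vis_corner3 H W maxR minC (↑n) (↑m) h2 h3 hn0 hn hm0 hm,
          vis_corner4 H W maxR maxC (↑n) (↑m) h2 h4 hn0 hn hm0 hm]
      by_cases p1 : ((n:Int) < minR ∧ (m:Int) < minC ∧ minR - n = minC - m) <;>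
      by_cases p2 : ((n:Int) < minR ∧ maxC < (m:Int) ∧ minR - n = (m:Int) - maxC) <;>
      by_cases p3 : (maxR < (n:Int) ∧ (m:Int) < minC ∧ (n:Int) - maxR = minC - m) <;>
      by_cases p4 : (maxR < (n:Int) ∧ maxC < (m:Int) ∧ (n:Int) - maxR = (m:Int) - maxC) <;>
      simp [gget, p1, p2, p3, p4]

-- ===== VERDICT (by name: the statement is the Claim_ definition above) =====
theorem transform_spec : Claim_equal_transform := by
  intro grid _ hpre
  obtain ⟨hne, _hposW, hrect⟩ := hpre
  unfold Spec_transform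
  have hget0 : PySem.List.pyGetD grid 0 [] = grid.headD [] := by
    cases grid with
    | nil => exact absurd rfl hne
    | cons a t => simp [PySem.List.pyGetD_zero_cons]
  have hW : ∀ row ∈ grid, (row.length : Int) = ((PySem.List.pyGetD grid 0 []).length : Int) := by
    intro row hmem
    rw [hget0]
    exact_mod_cast hrect row hmem
  obtain ⟨b1, b2, b3, b4⟩ := pvBBox_bounds grid (pvBg grid) (grid.length : Int)
    ((PySem.List.pyGetD grid 0 []).length : Int)
  exact main_eq grid (grid.length : Int) ((PySem.List.pyGetD grid 0 []).length : Int) _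
    (pvBBox grid (pvBg grid) (grid.length : Int) ((PySem.List.pyGetD grid 0 []).length : Int)).1
    (pvBBox grid (pvBg grid) (grid.length : Int) ((PySem.List.pyGetD grid 0 []).length : Int)).2.1
    (pvBBox grid (pvBg grid) (grid.length : Int) ((PySem.List.pyGetD grid 0 []).length : Int)).2.2.1
    (pvBBox grid (pvBg grid) (grid.length : Int) ((PySem.List.pyGetD grid 0 []).length : Int)).2.2.2
    rfl hW b1 b2 b3 b4
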